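-- pv_equiv track=rewrite | github.com/ladyy27/pico-placa-predictor | pico_placa_predictor/pico_placa/views.py | isAllowedToBeOnRoad
-- ===== SOURCE A (Python) =====
-- def time_is_between(time, time_range):
--     if time_range[1] < time_range[0]:
--         return time >= time_range[0] or time <= time_range[1]
--     return time_range[0] <= time <= time_range[1]
--
-- def isAllowedToBeOnRoadAccordingTimes(time,range1, range2, range3, range4):
--     if time_is_between(time, (range1, range2)) or time_is_between(time, (range3, range4)):
--         return True
--     else:
--         return False
--
-- def isAllowedToBeOnRoadAccordingDay(lastPlateDigit, plateRangeStart, plateRangeEnd, currentDay, dayOfweek, timeBetweenTimes):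
--     if lastPlateDigit == plateRangeStart or lastPlateDigit == plateRangeEnd:
--         if currentDay == dayOfweek:
--             if timeBetweenTimes:
--                 canBeOnRoad = False
--             else:
--                 canBeOnRoad = True
--         else:
--             canBeOnRoad = True
--     else:
--         canBeOnRoad = True
--     return canBeOnRoad
--
-- def isAllowedToBeOnRoad(currentTime,range1, range2, range3, range4, lastPlateDigit, currentDay):
--     timeBetweenTimes = isAllowedToBeOnRoadAccordingTimes(currentTime,range1, range2, range3, range4)
--     picoPlacaDays= []
--     picoPlacaDays.append(isAllowedToBeOnRoadAccordingDay(lastPlateDigit, 1, 2, currentDay, 0, timeBetweenTimes))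
--     picoPlacaDays.append(isAllowedToBeOnRoadAccordingDay(lastPlateDigit, 3, 4, currentDay, 1, timeBetweenTimes))
--     picoPlacaDays.append(isAllowedToBeOnRoadAccordingDay(lastPlateDigit, 5, 6, currentDay, 2, timeBetweenTimes))
--     picoPlacaDays.append(isAllowedToBeOnRoadAccordingDay(lastPlateDigit, 7, 8, currentDay, 3, timeBetweenTimes))
--     picoPlacaDays.append(isAllowedToBeOnRoadAccordingDay(lastPlateDigit, 9, 0, currentDay, 4, timeBetweenTimes))
--
--
--     if all(item == True for item in picoPlacaDays):
--         response = "Can be on the road"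
--     else:
--         response = "Cannot be on the road"
--     return response
-- ===== SOURCE B (Python) =====
-- RESTRICTED_DAY = {1: 0, 2: 0, 3: 1, 4: 1, 5: 2, 6: 2, 7: 3, 8: 3, 9: 4, 0: 4}
--
-- def _time_between(t, lo, hi):
--     if hi < lo:
--         return t >= lo or t <= hi
--     return lo <= t <= hi
--
-- def isAllowedToBeOnRoad(currentTime, range1, range2, range3, range4, lastPlateDigit, currentDay):
--     time_hit = _time_between(currentTime, range1, range2) or _time_between(currentTime, range3, range4)
--     restricted = RESTRICTED_DAY.get(lastPlateDigit)
--     forbidden = time_hit and restricted is not None and restricted == currentDay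
--     return "Cannot be on the road" if forbidden else "Can be on the road"
-- ===== Notes on version B (the rewrite author's own statement) =====
-- stated objective: simpler
-- what changed: Replaces the five per-digit-pair helper calls, the intermediate boolean list and the all() scan with a single digit-to-restricted-weekday table lookup and one comparison.
import Mathlib
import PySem

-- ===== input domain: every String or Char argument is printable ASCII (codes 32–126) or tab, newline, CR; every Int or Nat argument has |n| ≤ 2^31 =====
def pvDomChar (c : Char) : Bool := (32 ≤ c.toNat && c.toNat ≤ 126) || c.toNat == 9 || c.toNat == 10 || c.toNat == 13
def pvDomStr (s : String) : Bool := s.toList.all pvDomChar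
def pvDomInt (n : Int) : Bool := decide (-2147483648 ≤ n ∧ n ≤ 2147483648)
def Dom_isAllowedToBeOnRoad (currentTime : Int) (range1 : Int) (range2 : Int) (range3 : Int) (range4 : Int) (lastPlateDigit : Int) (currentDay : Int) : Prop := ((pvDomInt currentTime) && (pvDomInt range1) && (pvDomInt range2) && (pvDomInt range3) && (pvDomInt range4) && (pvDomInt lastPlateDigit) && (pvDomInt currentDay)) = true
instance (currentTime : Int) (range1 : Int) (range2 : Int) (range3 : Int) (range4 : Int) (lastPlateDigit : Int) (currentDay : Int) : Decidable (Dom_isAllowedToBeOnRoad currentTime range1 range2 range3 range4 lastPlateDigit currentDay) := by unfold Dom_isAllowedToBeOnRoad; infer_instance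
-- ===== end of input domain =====

-- B replaces A's five per-digit-pair helper calls, boolean list and all() scan with one
-- digit-to-restricted-weekday table lookup and a single comparison (objective: simpler).

-- ===== PORT A =====
def pvTimeIsBetween (time : Int) (timeRange : Int × Int) : Bool :=
  if timeRange.2 < timeRange.1 then
    decide (time ≥ timeRange.1) || decide (time ≤ timeRange.2)
  else
    decide (timeRange.1 ≤ time) && decide (time ≤ timeRange.2)

def pvAccordingTimes (time range1 range2 range3 range4 : Int) : Bool :=
  if pvTimeIsBetween time (range1, range2) || pvTimeIsBetween time (range3, range4) then true else false

def pvAccordingDay (lastPlateDigit plateRangeStart plateRangeEnd currentDay dayOfweek : Int) (timeBetweenTimes : Bool) : Bool :=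
  if lastPlateDigit = plateRangeStart ∨ lastPlateDigit = plateRangeEnd then
    if currentDay = dayOfweek then
      if timeBetweenTimes then false else true
    else true
  else true

def isAllowedToBeOnRoad (currentTime : Int) (range1 : Int) (range2 : Int) (range3 : Int) (range4 : Int) (lastPlateDigit : Int) (currentDay : Int) : String :=
  let timeBetweenTimes := pvAccordingTimes currentTime range1 range2 range3 range4
  let picoPlacaDays : List Bool :=
    [pvAccordingDay lastPlateDigit 1 2 currentDay 0 timeBetweenTimes,
     pvAccordingDay lastPlateDigit 3 4 currentDay 1 timeBetweenTimes,
     pvAccordingDay lastPlateDigit 5 6 currentDay 2 timeBetweenTimes,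
     pvAccordingDay lastPlateDigit 7 8 currentDay 3 timeBetweenTimes,
     pvAccordingDay lastPlateDigit 9 0 currentDay 4 timeBetweenTimes]
  if picoPlacaDays.all (fun item => item == true) then "Can be on the road" else "Cannot be on the road"

-- ===== PORT B =====
def pvRestrictedDay : PySem.Dict Int Int :=
  PySem.Dict.mk [(1,0),(2,0),(3,1),(4,1),(5,2),(6,2),(7,3),(8,3),(9,4),(0,4)]

def pvTimeBetweenB (t lo hi : Int) : Bool :=
  if hi < lo then decide (t ≥ lo) || decide (t ≤ hi)
  else decide (lo ≤ t) && decide (t ≤ hi)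

def isAllowedToBeOnRoad_alt (currentTime : Int) (range1 : Int) (range2 : Int) (range3 : Int) (range4 : Int) (lastPlateDigit : Int) (currentDay : Int) : String :=
  let timeHit := pvTimeBetweenB currentTime range1 range2 || pvTimeBetweenB currentTime range3 range4
  let restricted := pvRestrictedDay.get? lastPlateDigit
  let forbidden := timeHit && (match restricted with
    | some r => decide (r = currentDay)   -- 'restricted is not None and restricted == currentDay'
    | none => false)
  if forbidden then "Cannot be on the road" else "Can be on the road"

-- ===== PRECONDITION & SPEC =====
def Spec_isAllowedToBeOnRoad (currentTime : Int) (range1 : Int) (range2 : Int) (range3 : Int) (range4 : Int) (lastPlateDigit : Int) (currentDay : Int) (out : String) : Prop := out = isAllowedToBeOnRoad_alt currentTime range1 range2 range3 range4 lastPlateDigit currentDay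
instance (currentTime : Int) (range1 : Int) (range2 : Int) (range3 : Int) (range4 : Int) (lastPlateDigit : Int) (currentDay : Int) (out : String) : Decidable (Spec_isAllowedToBeOnRoad currentTime range1 range2 range3 range4 lastPlateDigit currentDay out) := by unfold Spec_isAllowedToBeOnRoad; infer_instance

-- ===== CLAIM (what is proved, stated in full; the proofs are below) =====
def Claim_equal_isAllowedToBeOnRoad : Prop := ∀ (currentTime : Int) (range1 : Int) (range2 : Int) (range3 : Int) (range4 : Int) (lastPlateDigit : Int) (currentDay : Int), Dom_isAllowedToBeOnRoad currentTime range1 range2 range3 range4 lastPlateDigit currentDay → Spec_isAllowedToBeOnRoad currentTime range1 range2 range3 range4 lastPlateDigit currentDay (isAllowedToBeOnRoad currentTime range1 range2 range3 range4 lastPlateDigit currentDay)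

-- ===== LEMMAS AND PROOFS =====

-- A's wrapped time test equals B's helper disjunction.
theorem pvTimesEq (t a b c d : Int) :
    pvAccordingTimes t a b c d = (pvTimeBetweenB t a b || pvTimeBetweenB t c d) := by
  simp [pvAccordingTimes, pvTimeIsBetween, pvTimeBetweenB]

-- A's conjunction of the five per-pair day checks equals the negation of B's table-lookup test.
theorem pvTable (d cd : Int) (tb : Bool) :
    (pvAccordingDay d 1 2 cd 0 tb && (pvAccordingDay d 3 4 cd 1 tb &&
     (pvAccordingDay d 5 6 cd 2 tb && (pvAccordingDay d 7 8 cd 3 tb &&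
      pvAccordingDay d 9 0 cd 4 tb))))
    = !(tb && (match pvRestrictedDay.get? d with
               | some r => decide (r = cd)
               | none => false)) := by
  by_cases h1 : d = 1
  · subst h1; simp only [pvAccordingDay, pvRestrictedDay, PySem.Dict.get?_mk_cons]; norm_num
    cases tb
    all_goals by_cases hcd : cd = 0 <;> simp_all <;> omega
  by_cases h2 : d = 2
  · subst h2; simp only [pvAccordingDay, pvRestrictedDay, PySem.Dict.get?_mk_cons]; norm_num
    cases tb
    all_goals by_cases hcd : cd = 0 <;> simp_all <;> omega
  by_cases h3 : d = 3
  · subst h3; simp only [pvAccordingDay, pvRestrictedDay, PySem.Dict.get?_mk_cons]; norm_num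
    cases tb
    all_goals by_cases hcd : cd = 1 <;> simp_all <;> omega
  by_cases h4 : d = 4
  · subst h4; simp only [pvAccordingDay, pvRestrictedDay, PySem.Dict.get?_mk_cons]; norm_num
    cases tb
    all_goals by_cases hcd : cd = 1 <;> simp_all <;> omega
  by_cases h5 : d = 5
  · subst h5; simp only [pvAccordingDay, pvRestrictedDay, PySem.Dict.get?_mk_cons]; norm_num
    cases tb
    all_goals by_cases hcd : cd = 2 <;> simp_all <;> omega
  by_cases h6 : d = 6
  · subst h6; simp only [pvAccordingDay, pvRestrictedDay, PySem.Dict.get?_mk_cons]; norm_num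
    cases tb
    all_goals by_cases hcd : cd = 2 <;> simp_all <;> omega
  by_cases h7 : d = 7
  · subst h7; simp only [pvAccordingDay, pvRestrictedDay, PySem.Dict.get?_mk_cons]; norm_num
    cases tb
    all_goals by_cases hcd : cd = 3 <;> simp_all <;> omega
  by_cases h8 : d = 8
  · subst h8; simp only [pvAccordingDay, pvRestrictedDay, PySem.Dict.get?_mk_cons]; norm_num
    cases tb
    all_goals by_cases hcd : cd = 3 <;> simp_all <;> omega
  by_cases h9 : d = 9
  · subst h9; simp only [pvAccordingDay, pvRestrictedDay, PySem.Dict.get?_mk_cons]; norm_num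
    cases tb
    all_goals by_cases hcd : cd = 4 <;> simp_all <;> omega
  by_cases h0 : d = 0
  · subst h0; simp only [pvAccordingDay, pvRestrictedDay, PySem.Dict.get?_mk_cons]; norm_num
    cases tb
    all_goals by_cases hcd : cd = 4 <;> simp_all <;> omega
  · simp only [pvAccordingDay, pvRestrictedDay, PySem.Dict.get?_mk_cons]
    simp_all [show (PySem.Dict.mk ([] : List (Int × Int))).get? d = none from rfl, Ne.symm]

-- ===== VERDICT (by name: the statement is the Claim_ definition above) =====
theorem isAllowedToBeOnRoad_spec : Claim_equal_isAllowedToBeOnRoad := by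
  intro currentTime range1 range2 range3 range4 lastPlateDigit currentDay _
  unfold Spec_isAllowedToBeOnRoad isAllowedToBeOnRoad isAllowedToBeOnRoad_alt
  simp only [List.all_cons, List.all_nil, Bool.and_true, beq_true, pvTimesEq]
  rw [pvTable]
  cases h : (pvTimeBetweenB currentTime range1 range2 || pvTimeBetweenB currentTime range3 range4) &&
      (match pvRestrictedDay.get? lastPlateDigit with
       | some r => decide (r = currentDay)
       | none => false) <;> simp
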